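-- pv_equiv track=rewrite | github.com/idahoenigmann/ba_t_cell | implementation/separate.py | index_term_to_data
-- ===== SOURCE A (Python) =====
-- def index_term_to_data(data, term):
--     def term_sub_helper(data, term):
--         token_lst = term.split("-")
--         if len(token_lst) == 1:
--             return data[term]
--         else:
--             tmp = data[token_lst[0]]
--             for i in range(1, len(token_lst)):
--                 tmp -= data[token_lst[i]]
--             return tmp
--
--     token_lst = term.split("+")
--     if len(token_lst) == 1:
--         return term_sub_helper(data, term)
--     else:
--         tmp = term_sub_helper(data, token_lst[0])
--         for i in range(1, len(token_lst)):
--             tmp += term_sub_helper(data, token_lst[i])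
--         return tmp
-- ===== SOURCE B (Python) =====
-- def index_term_to_data(data, term):
--     # one flat pass: tokenize into (operator, key) pairs, then fold left to right
--     parts = []
--     op, key = None, ""
--     for ch in term:
--         if ch == '+' or ch == '-':
--             parts.append((op, key))
--             op, key = ch, ""
--         else:
--             key += ch
--     parts.append((op, key))
--     result = data[parts[0][1]]
--     for o, k in parts[1:]:
--         if o == '+':
--             result += data[k]
--         else:
--             result -= data[k]
--     return result
-- ===== Notes on version B (the rewrite author's own statement) =====
-- stated objective: simpler
-- what changed: A's nested two-level scan (split the term by '+', then split each piece by '-' in a helper with range-indexed loops) is replaced by one flat left-to-right pass that tokenizes the term once into (operator, key) pairs and folds them with += / -=.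
import Mathlib
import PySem

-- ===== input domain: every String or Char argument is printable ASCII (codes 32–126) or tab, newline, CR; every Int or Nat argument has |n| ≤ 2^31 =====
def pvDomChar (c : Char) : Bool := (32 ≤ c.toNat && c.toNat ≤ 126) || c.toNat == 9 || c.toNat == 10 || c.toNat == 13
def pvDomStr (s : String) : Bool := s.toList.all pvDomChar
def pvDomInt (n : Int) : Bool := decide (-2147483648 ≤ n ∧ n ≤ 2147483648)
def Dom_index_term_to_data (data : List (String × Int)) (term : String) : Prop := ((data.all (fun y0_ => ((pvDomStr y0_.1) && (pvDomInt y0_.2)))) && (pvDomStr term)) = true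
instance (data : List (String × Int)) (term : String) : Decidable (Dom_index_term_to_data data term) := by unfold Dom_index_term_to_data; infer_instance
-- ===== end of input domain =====

-- B replaces A's nested split-by-'+' / split-by-'-' two-level scan by a single flat
-- left-to-right pass: tokenize once into (operator, key) pairs, then one fold (objective: simpler).

-- ===== PORT A =====
-- transliteration of A's nested def term_sub_helper(data, term) (dict lookup data[k]:
-- none = KeyError, excluded by Pre_, so on Pre_ the .getD 0 default is never taken)
def term_sub_helper (data : List (String × Int)) (term : String) : Int :=
  let token_lst := (PySem.Str.split? term "-").getD []
  if PySem.List.len token_lst = 1 then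
    ((PySem.Dict.mk data).get? term).getD 0
  else
    (PySem.List.pyRange 1 (PySem.List.len token_lst)).foldl
      (fun tmp i => tmp - ((PySem.Dict.mk data).get? (PySem.List.pyGetD token_lst i "")).getD 0)
      (((PySem.Dict.mk data).get? (PySem.List.pyGetD token_lst 0 "")).getD 0)

def index_term_to_data (data : List (String × Int)) (term : String) : Int :=
  let token_lst := (PySem.Str.split? term "+").getD []
  if PySem.List.len token_lst = 1 then
    term_sub_helper data term
  else
    (PySem.List.pyRange 1 (PySem.List.len token_lst)).foldl
      (fun tmp i => tmp + term_sub_helper data (PySem.List.pyGetD token_lst i ""))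
      (term_sub_helper data (PySem.List.pyGetD token_lst 0 ""))

-- ===== PORT B =====
-- transliteration of Source B: one char pass building (op, key) pairs, then one fold over parts[1:]
def index_term_to_data_alt (data : List (String × Int)) (term : String) : Int :=
  let st := term.toList.foldl
    (fun (st : List (Option Char × List Char) × Option Char × List Char) ch =>
      if ch = '+' ∨ ch = '-' then (st.1 ++ [st.2], some ch, [])
      else (st.1, st.2.1, st.2.2 ++ [ch]))
    ([], none, [])
  let parts := st.1 ++ [st.2]
  parts.tail.foldl
    (fun result p =>
      if p.1 = some '+' then result + ((PySem.Dict.mk data).get? (String.ofList p.2)).getD 0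
      else result - ((PySem.Dict.mk data).get? (String.ofList p.2)).getD 0)
    (((PySem.Dict.mk data).get? (String.ofList parts.headI.2)).getD 0)

-- ===== PRECONDITION & SPEC =====
-- Pre_: every key named in the term (the pieces between '+'/'-' signs) is present in data;
-- on a missing key the Python A raises KeyError (and B raises the same KeyError).
def Pre_index_term_to_data (data : List (String × Int)) (term : String) : Prop :=
  ∀ p ∈ (PySem.Str.split? term "+").getD [],
    ∀ q ∈ (PySem.Str.split? p "-").getD [],
      ((PySem.Dict.mk data).get? q).isSome = true
instance (data : List (String × Int)) (term : String) : Decidable (Pre_index_term_to_data data term) := by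
  unfold Pre_index_term_to_data; infer_instance

def pvWitness_index_term_to_data : (List (String × Int)) × String :=
  ([("a", 1), ("b", 2), ("c", 5)], "a+b-c+a")

def Spec_index_term_to_data (data : List (String × Int)) (term : String) (out : Int) : Prop := out = index_term_to_data_alt data term
instance (data : List (String × Int)) (term : String) (out : Int) : Decidable (Spec_index_term_to_data data term out) := by unfold Spec_index_term_to_data; infer_instance

-- ===== CLAIM (what is proved, stated in full; the proofs are below) =====
def Claim_equal_index_term_to_data : Prop := ∀ (data : List (String × Int)) (term : String), Dom_index_term_to_data data term → Pre_index_term_to_data data term → Spec_index_term_to_data data term (index_term_to_data data term)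

-- ===== LEMMAS AND PROOFS =====

-- structural single-character split: msplit c cs = (piece before first c, remaining pieces)
def msplit (c : Char) : List Char → List Char × List (List Char)
  | [] => ([], [])
  | x :: xs =>
    let r := msplit c xs
    if x = c then ([], r.1 :: r.2) else (x :: r.1, r.2)

-- structural tokenizer: parseT cs = (first key, list of (operator, key) pairs)
def parseT : List Char → List Char × List (Char × List Char)
  | [] => ([], [])
  | x :: xs =>
    let r := parseT xs
    if x = '+' ∨ x = '-' then ([], (x, r.1) :: r.2) else (x :: r.1, r.2)

-- signed sum of the (operator, key) pairs, for an abstract lookup lk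
def delta (lk : String → Int) : List (Char × List Char) → Int
  | [] => 0
  | (o, k) :: ps => (if o = '+' then lk (String.ofList k) else -lk (String.ofList k)) + delta lk ps

-- the common target value: first key plus the signed sum of the rest
def tokV (lk : String → Int) (cs : List Char) : Int :=
  lk (String.ofList (parseT cs).1) + delta lk (parseT cs).2

-- value of one '-'-separated piece, A-style
def subV (lk : String → Int) (p : List Char) : Int :=
  lk (String.ofList (msplit '-' p).1) - ((msplit '-' p).2.map (fun q => lk (String.ofList q))).sum

lemma splitOn_go_msplit (c : Char) :
    ∀ (fuel : Nat) (l cur : List Char) (acc : List (List Char)), l.length < fuel →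
      PySem.Chars.splitOn.go [c] fuel l cur acc
        = acc.reverse ++ ((cur.reverse ++ (msplit c l).1) :: (msplit c l).2) := by
  intro fuel
  induction fuel with
  | zero => intro l cur acc h; omega
  | succ f ih =>
    intro l cur acc h
    cases l with
    | nil => simp [PySem.Chars.splitOn.go, msplit]
    | cons x rest =>
      by_cases hx : x = c
      · subst hx
        have hpre : [x].isPrefixOf (x :: rest) = true := by simp [List.isPrefixOf]
        simp only [PySem.Chars.splitOn.go, hpre, if_pos, List.length_cons, List.length_nil,
          Nat.zero_add, List.drop_succ_cons, List.drop_zero]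
        rw [ih rest [] (cur.reverse :: acc) (by simpa using Nat.lt_of_succ_lt_succ h)]
        simp [msplit]
      · have hpre : [c].isPrefixOf (x :: rest) = false := by
          simp [List.isPrefixOf]; exact fun hc => (hx hc.symm).elim
        simp only [PySem.Chars.splitOn.go, hpre, Bool.false_eq_true, if_false]
        rw [ih rest (x :: cur) acc (by simpa using Nat.lt_of_succ_lt_succ h)]
        simp [msplit, hx]

lemma splitOn_eq_msplit (c : Char) (cs : List Char) :
    PySem.Chars.splitOn cs [c] = (msplit c cs).1 :: (msplit c cs).2 := by
  unfold PySem.Chars.splitOn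
  rw [splitOn_go_msplit c (cs.length + 1) cs [] [] (Nat.lt_succ_self _)]
  simp

-- Str.split? with a one-character separator, through the msplit characterization
lemma split_getD (s : String) (c : Char) (sep : String) (hsep : sep.toList = [c]) :
    (PySem.Str.split? s sep).getD []
      = String.ofList (msplit c s.toList).1 :: ((msplit c s.toList).2).map String.ofList := by
  simp [PySem.Str.split?, PySem.Chars.split?, hsep, splitOn_eq_msplit]

lemma msplit_nil_snd (c : Char) : ∀ cs : List Char, (msplit c cs).2 = [] → (msplit c cs).1 = cs := by
  intro cs
  induction cs with
  | nil => simp [msplit]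
  | cons x xs ih =>
    simp only [msplit]
    by_cases hx : x = c <;> simp [hx]
    intro h; exact ih h

lemma foldl_sub_sum (data : List (String × Int)) (l : List (List Char)) :
    ∀ a : Int, (l.map String.ofList).foldl
        (fun tmp q => tmp - ((PySem.Dict.mk data).get? q).getD 0) a
      = a - (l.map (fun q => ((PySem.Dict.mk data).get? (String.ofList q)).getD 0)).sum := by
  induction l with
  | nil => simp
  | cons q l ih => intro a; simp [ih]; ring

-- A's term_sub_helper computes subV
lemma helper_eq_subV (data : List (String × Int)) (lk : String → Int)
    (hlk : lk = fun k => ((PySem.Dict.mk data).get? k).getD 0) (s : String) :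
    term_sub_helper data s = subV lk s.toList := by
  subst hlk
  unfold term_sub_helper
  rw [split_getD s '-' "-" (by decide)]
  by_cases h : (msplit '-' s.toList).2 = []
  · have h1 : (msplit '-' s.toList).1 = s.toList := msplit_nil_snd '-' _ h
    simp [PySem.List.len, h, subV, h1]
  · have hlen : PySem.List.len (String.ofList (msplit '-' s.toList).1 ::
        ((msplit '-' s.toList).2).map String.ofList) ≠ 1 := by
      have hpos : 0 < (msplit '-' s.toList).2.length := List.length_pos_of_ne_nil h
      simp only [PySem.List.len, List.length_cons, List.length_map]
      omega
    simp only [if_neg hlen]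
    rw [PySem.List.foldl_pyRange_pyGetD _ "" (fun tmp q => tmp - ((PySem.Dict.mk data).get? q).getD 0) _ (by omega)]
    simp only [Int.toNat_one, List.drop_one, List.tail_cons]
    rw [foldl_sub_sum data]
    rw [PySem.List.pyGetD_of_nonneg _ _ (by omega)]
    simp [subV]

lemma foldl_add_subV (data : List (String × Int)) (lk : String → Int)
    (hlk : lk = fun k => ((PySem.Dict.mk data).get? k).getD 0) (l : List (List Char)) :
    ∀ a : Int, (l.map String.ofList).foldl (fun t s => t + term_sub_helper data s) a
      = a + (l.map (subV lk)).sum := by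
  induction l with
  | nil => simp
  | cons p l ih =>
    intro a
    simp only [List.map_cons, List.foldl_cons, List.sum_cons, ih]
    rw [helper_eq_subV data lk hlk]
    simp [String.toList_ofList]; ring


-- the first key is the same through both decompositions
lemma first_key_eq : ∀ cs : List Char, (msplit '-' (msplit '+' cs).1).1 = (parseT cs).1 := by
  intro cs
  induction cs with
  | nil => simp [msplit, parseT]
  | cons x xs ih =>
    by_cases hp : x = '+'
    · simp [msplit, parseT, hp]
    · by_cases hm : x = '-'
      · simp [msplit, parseT, hm]
      · simp [msplit, parseT, hp, hm, ih]

-- the A-style value (head piece plus sum of the other pieces) is the flat tokenized value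
lemma AV_eq_tokV (lk : String → Int) : ∀ cs : List Char,
    subV lk (msplit '+' cs).1 + (((msplit '+' cs).2).map (subV lk)).sum = tokV lk cs := by
  intro cs
  induction cs with
  | nil => simp [msplit, parseT, subV, tokV, delta]
  | cons x xs ih =>
    by_cases hp : x = '+'
    · subst hp
      have e1 : msplit '+' ('+' :: xs) = ([], (msplit '+' xs).1 :: (msplit '+' xs).2) := by
        simp [msplit]
      have e2 : parseT ('+' :: xs) = ([], ('+', (parseT xs).1) :: (parseT xs).2) := by
        simp [parseT]
      have e3 : subV lk [] = lk (String.ofList []) := by simp [subV, msplit]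
      simp only [tokV] at ih ⊢
      rw [e1, e2, e3]
      simp only [List.map_cons, List.sum_cons, delta, reduceIte]
      omega
    · by_cases hm : x = '-'
      · subst hm
        have hk := first_key_eq xs
        have e1 : msplit '+' ('-' :: xs) = ('-' :: (msplit '+' xs).1, (msplit '+' xs).2) := by
          simp [msplit]
        have e2 : parseT ('-' :: xs) = ([], ('-', (parseT xs).1) :: (parseT xs).2) := by
          simp [parseT]
        have e3 : msplit '-' ('-' :: (msplit '+' xs).1)
            = ([], (msplit '-' (msplit '+' xs).1).1 :: (msplit '-' (msplit '+' xs).1).2) := by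
          simp [msplit]
        simp only [tokV] at ih ⊢
        rw [e1, e2]
        simp only [subV, e3, List.map_cons, List.sum_cons, delta, reduceIte,
          Char.reduceEq] at ih ⊢
        rw [hk] at ih ⊢
        omega
      · have hx : ¬ (x = '+' ∨ x = '-') := by tauto
        have hk := first_key_eq xs
        have e1 : msplit '+' (x :: xs) = (x :: (msplit '+' xs).1, (msplit '+' xs).2) := by
          simp [msplit, hp]
        have e2 : parseT (x :: xs) = (x :: (parseT xs).1, (parseT xs).2) := by
          simp [parseT, hx]
        have e3 : msplit '-' (x :: (msplit '+' xs).1)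
            = (x :: (msplit '-' (msplit '+' xs).1).1, (msplit '-' (msplit '+' xs).1).2) := by
          simp [msplit, hm]
        simp only [tokV] at ih ⊢
        rw [e1, e2]
        simp only [subV, e3] at ih ⊢
        rw [hk] at ih ⊢
        omega

-- port A computes the flat tokenized value
lemma portA_eq_tokV (data : List (String × Int)) (lk : String → Int)
    (hlk : lk = fun k => ((PySem.Dict.mk data).get? k).getD 0) (term : String) :
    index_term_to_data data term = tokV lk term.toList := by
  unfold index_term_to_data
  rw [split_getD term '+' "+" (by decide)]
  rw [← AV_eq_tokV lk term.toList]
  by_cases h : (msplit '+' term.toList).2 = []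
  · have h1 : (msplit '+' term.toList).1 = term.toList := msplit_nil_snd '+' _ h
    rw [if_pos (by simp [PySem.List.len, h])]
    rw [helper_eq_subV data lk hlk]
    simp [h, h1]
  · have hlen : PySem.List.len (String.ofList (msplit '+' term.toList).1 ::
        ((msplit '+' term.toList).2).map String.ofList) ≠ 1 := by
      have hpos : 0 < (msplit '+' term.toList).2.length := List.length_pos_of_ne_nil h
      simp only [PySem.List.len, List.length_cons, List.length_map]
      omega
    simp only [if_neg hlen]
    rw [PySem.List.foldl_pyRange_pyGetD _ "" (fun tmp s => tmp + term_sub_helper data s) _ (by omega)]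
    simp only [Int.toNat_one, List.drop_one, List.tail_cons]
    rw [PySem.List.pyGetD_of_nonneg _ _ (by omega)]
    rw [foldl_add_subV data lk hlk]
    simp only [Int.toNat_zero, List.getD_cons_zero]
    rw [helper_eq_subV data lk hlk]
    simp [String.toList_ofList]

-- B's accumulating tokenizer produces exactly parseT's parts
lemma foldl_parts :
    ∀ (cs : List Char) (acc : List (Option Char × List Char)) (op : Option Char) (key : List Char),
      (cs.foldl (fun (st : List (Option Char × List Char) × Option Char × List Char) ch =>
          if ch = '+' ∨ ch = '-' then (st.1 ++ [st.2], some ch, [])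
          else (st.1, st.2.1, st.2.2 ++ [ch])) (acc, op, key)).1
        ++ [(cs.foldl (fun (st : List (Option Char × List Char) × Option Char × List Char) ch =>
          if ch = '+' ∨ ch = '-' then (st.1 ++ [st.2], some ch, [])
          else (st.1, st.2.1, st.2.2 ++ [ch])) (acc, op, key)).2]
        = acc ++ (op, key ++ (parseT cs).1) :: (parseT cs).2.map (fun p => (some p.1, p.2)) := by
  intro cs
  induction cs with
  | nil => intro acc op key; simp [parseT]
  | cons x xs ih =>
    intro acc op key
    by_cases hx : x = '+' ∨ x = '-'
    · simp only [List.foldl_cons, hx, if_true, parseT]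
      rw [ih]
      simp
    · simp only [List.foldl_cons, hx, if_false, parseT]
      rw [ih]
      simp

-- the final fold of B adds exactly delta
lemma foldl_delta (data : List (String × Int)) (lk : String → Int)
    (hlk : lk = fun k => ((PySem.Dict.mk data).get? k).getD 0) (ps : List (Char × List Char)) :
    ∀ a : Int, (ps.map (fun p => ((some p.1 : Option Char), p.2))).foldl
        (fun result p => if p.1 = some '+' then result + ((PySem.Dict.mk data).get? (String.ofList p.2)).getD 0
                         else result - ((PySem.Dict.mk data).get? (String.ofList p.2)).getD 0) a
      = a + delta lk ps := by
  induction ps with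
  | nil => simp [delta]
  | cons p ps ih =>
    intro a
    obtain ⟨o, k⟩ := p
    by_cases ho : o = '+' <;> simp [delta, ho, ih, hlk] <;> ring

-- port B computes the flat tokenized value
lemma portB_eq_tokV (data : List (String × Int)) (lk : String → Int)
    (hlk : lk = fun k => ((PySem.Dict.mk data).get? k).getD 0) (term : String) :
    index_term_to_data_alt data term = tokV lk term.toList := by
  have hparts := foldl_parts term.toList [] none []
  simp only [List.nil_append] at hparts
  simp only [index_term_to_data_alt]
  rw [hparts]
  simp only [List.tail_cons, List.headI]
  rw [foldl_delta data lk hlk]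
  simp [tokV, hlk]

-- ===== VERDICT (by name: the statement is the Claim_ definition above) =====
theorem index_term_to_data_spec : Claim_equal_index_term_to_data := by
  intro data term _ _
  unfold Spec_index_term_to_data
  rw [portA_eq_tokV data (fun k => ((PySem.Dict.mk data).get? k).getD 0) rfl term,
      portB_eq_tokV data (fun k => ((PySem.Dict.mk data).get? k).getD 0) rfl term]
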